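-- pv_equiv track=rewrite | github.com/1digitaldesign/kettler-data-analysis | scripts/utils/fix_markdown_linting.py | fix_blank_lines
-- ===== SOURCE A (Python) =====
-- def fix_blank_lines(content: str) -> str:
--     """Ensure proper blank lines between sections."""
--     lines = content.split('\n')
--     fixed_lines = []
--     prev_line_empty = False
--
--     for i, line in enumerate(lines):
--         stripped = line.strip()
--         is_empty = not stripped
--
--         # Skip multiple consecutive empty lines (keep max 2)
--         if is_empty and prev_line_empty and fixed_lines and fixed_lines[-1].strip() == '':
--             continue
--
--         # Ensure blank line before headers (except first line)
--         if stripped.startswith('#') and fixed_lines and fixed_lines[-1].strip() != '':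
--             # Check if previous line is already empty
--             if fixed_lines[-1].strip() != '':
--                 fixed_lines.append('')
--
--         fixed_lines.append(line.rstrip())
--         prev_line_empty = is_empty
--
--     return '\n'.join(fixed_lines)
-- ===== SOURCE B (Python) =====
-- def fix_blank_lines(content: str) -> str:
--     """Ensure proper blank lines between sections (two-pass rewrite)."""
--     # Pass 1: rstrip every line, collapsing each run of blank lines to one blank.
--     mid = []
--     for line in content.split('\n'):
--         r = line.rstrip()
--         if r == '' and mid and mid[-1] == '':
--             continue
--         mid.append(r)
--     # Pass 2: insert a blank line before any header not already preceded by one.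
--     result = []
--     for line in mid:
--         if line.strip().startswith('#') and result and result[-1] != '':
--             result.append('')
--         result.append(line)
--     return '\n'.join(result)
-- ===== Notes on version B (the rewrite author's own statement) =====
-- stated objective: simpler
-- what changed: Replaced A's single stateful loop (prev_line_empty flag plus interleaved skip/insert logic with a redundant nested check) by two plain passes: pass 1 rstrips lines and collapses each run of blank lines to one blank, pass 2 inserts a blank line before any header not already preceded by one.
import Mathlib
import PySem

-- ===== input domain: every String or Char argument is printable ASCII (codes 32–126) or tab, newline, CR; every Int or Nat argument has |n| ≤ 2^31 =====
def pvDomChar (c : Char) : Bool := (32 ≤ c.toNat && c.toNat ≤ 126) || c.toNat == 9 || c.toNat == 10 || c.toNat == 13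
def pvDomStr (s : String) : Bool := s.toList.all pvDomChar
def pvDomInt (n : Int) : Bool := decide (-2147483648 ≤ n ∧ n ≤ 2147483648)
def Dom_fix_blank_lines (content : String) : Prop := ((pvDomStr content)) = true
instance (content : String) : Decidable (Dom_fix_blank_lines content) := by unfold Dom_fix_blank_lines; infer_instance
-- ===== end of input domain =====

-- B replaces A's single stateful pass by two passes (collapse blank runs, then insert
-- blanks before headers); same return value, objective: simpler decomposition.

-- ===== PORT A =====
-- one loop iteration of A; `fixed_lines[-1]` is read as getLast?.getD "" — exact, because the
-- Python expression is only evaluated under the truthiness guard `fixed_lines`.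
def stepA (st : List String × Bool) (line : String) : List String × Bool :=
  let stripped := PySem.Str.strip line
  let isEmpty : Bool := stripped == ""
  if isEmpty && st.2 && !st.1.isEmpty && (PySem.Str.strip (st.1.getLast?.getD "") == "") then
    st
  else
    let fixed :=
      if PySem.Str.startswith stripped "#" && !st.1.isEmpty
          && !(PySem.Str.strip (st.1.getLast?.getD "") == "") then
        -- A's redundant inner check, kept literally
        if !(PySem.Str.strip (st.1.getLast?.getD "") == "") then st.1 ++ [""] else st.1
      else st.1
    (fixed ++ [PySem.Str.rstrip line], isEmpty)

def fix_blank_lines (content : String) : String :=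
  -- content.split('\n'): separator is the non-empty literal "\n", so Chars.splitOn is exact
  let lines := (PySem.Chars.splitOn content.toList ['\n']).map String.ofList
  PySem.Str.join "\n" (lines.foldl stepA ([], false)).1

-- ===== PORT B =====
-- pass 1: rstrip each line, collapsing each run of blank lines to a single blank
def pass1Step (mid : List String) (line : String) : List String :=
  let r := PySem.Str.rstrip line
  if r == "" && !mid.isEmpty && (mid.getLast?.getD "" == "") then mid else mid ++ [r]

-- pass 2: insert a blank line before any header not already preceded by one
def pass2Step (res : List String) (line : String) : List String :=
  let res' :=
    if PySem.Str.startswith (PySem.Str.strip line) "#" && !res.isEmpty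
        && !(res.getLast?.getD "" == "") then res ++ [""]
    else res
  res' ++ [line]

def fix_blank_lines_alt (content : String) : String :=
  let lines := (PySem.Chars.splitOn content.toList ['\n']).map String.ofList
  let mid := lines.foldl pass1Step []
  PySem.Str.join "\n" (mid.foldl pass2Step [])

-- ===== PRECONDITION & SPEC =====
def Spec_fix_blank_lines (content : String) (out : String) : Prop := out = fix_blank_lines_alt content
instance (content : String) (out : String) : Decidable (Spec_fix_blank_lines content out) := by unfold Spec_fix_blank_lines; infer_instance

-- ===== CLAIM (what is proved, stated in full; the proofs are below) =====
def Claim_equal_fix_blank_lines : Prop := ∀ (content : String), Dom_fix_blank_lines content → Spec_fix_blank_lines content (fix_blank_lines content)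

-- ===== LEMMAS AND PROOFS =====

lemma rstrip_nil_iff (s : List Char) :
    PySem.Chars.rstrip s = [] ↔ ∀ c ∈ s, PySem.Chars.isspace c := by
  simp [PySem.Chars.rstrip, List.dropWhile_eq_nil_iff]

lemma strip_nil_iff (s : List Char) :
    PySem.Chars.strip s = [] ↔ ∀ c ∈ s, PySem.Chars.isspace c := by
  unfold PySem.Chars.strip PySem.Chars.lstrip
  rw [rstrip_nil_iff]
  constructor
  · intro h c hc
    rw [← List.takeWhile_append_dropWhile (p := PySem.Chars.isspace) (l := s)] at hc
    rcases List.mem_append.1 hc with h1 | h2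
    · exact List.mem_takeWhile_imp h1
    · exact h _ h2
  · intro h c hc
    exact h c ((List.dropWhile_sublist _).mem hc)

lemma rstrip_idem (s : List Char) :
    PySem.Chars.rstrip (PySem.Chars.rstrip s) = PySem.Chars.rstrip s := by
  simp [PySem.Chars.rstrip, List.dropWhile_idempotent]

lemma rstrip_cons (c : Char) (s : List Char) :
    PySem.Chars.rstrip (c :: s) =
      if PySem.Chars.rstrip s = [] then (if PySem.Chars.isspace c then [] else [c])
      else c :: PySem.Chars.rstrip s := by
  simp only [PySem.Chars.rstrip, List.reverse_cons, List.dropWhile_append]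
  by_cases h : s.reverse.dropWhile PySem.Chars.isspace = []
  · cases hc : PySem.Chars.isspace c <;> simp [h, List.dropWhile, hc]
  · simp [h, List.isEmpty_iff]

lemma lstrip_rstrip_comm (s : List Char) :
    PySem.Chars.lstrip (PySem.Chars.rstrip s) = PySem.Chars.rstrip (PySem.Chars.lstrip s) := by
  induction s with
  | nil => rfl
  | cons c s ih =>
    rw [rstrip_cons]
    by_cases hc : PySem.Chars.isspace c
    · by_cases hs : PySem.Chars.rstrip s = []
      · simp only [hs, hc]
        have : PySem.Chars.lstrip (c :: s) = PySem.Chars.lstrip s := by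
          simp [PySem.Chars.lstrip, hc]
        rw [this, ← ih, hs]
        rfl
      · rw [if_neg hs]
        have h1 : PySem.Chars.lstrip (c :: PySem.Chars.rstrip s) =
            PySem.Chars.lstrip (PySem.Chars.rstrip s) := by
          simp [PySem.Chars.lstrip, List.dropWhile, hc]
        have h2 : PySem.Chars.lstrip (c :: s) = PySem.Chars.lstrip s := by
          simp [PySem.Chars.lstrip, List.dropWhile, hc]
        rw [h1, h2, ih]
    · by_cases hs : PySem.Chars.rstrip s = []
      · simp only [hs, hc]
        have h2 : PySem.Chars.lstrip (c :: s) = c :: s := by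
          simp [PySem.Chars.lstrip, List.dropWhile, hc]
        rw [h2, rstrip_cons, hs, if_pos rfl, if_neg hc]
        simp [PySem.Chars.lstrip, List.dropWhile, hc]
      · rw [if_neg hs]
        have h1 : PySem.Chars.lstrip (c :: PySem.Chars.rstrip s) = c :: PySem.Chars.rstrip s := by
          simp [PySem.Chars.lstrip, List.dropWhile, hc]
        have h2 : PySem.Chars.lstrip (c :: s) = c :: s := by
          simp [PySem.Chars.lstrip, List.dropWhile, hc]
        rw [h1, h2, rstrip_cons, if_neg hs]

lemma strip_rstrip (s : List Char) :
    PySem.Chars.strip (PySem.Chars.rstrip s) = PySem.Chars.strip s := by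
  unfold PySem.Chars.strip
  rw [lstrip_rstrip_comm, rstrip_idem]

-- String-level versions
lemma str_strip_nil_iff (x : String) : PySem.Str.strip x = "" ↔ PySem.Str.rstrip x = "" := by
  rw [String.ext_iff, String.ext_iff]
  simp only [PySem.Str.strip, PySem.Str.rstrip, String.toList_ofList]
  have : ("" : String).toList = [] := rfl
  rw [this, strip_nil_iff, rstrip_nil_iff]

lemma str_strip_rstrip (x : String) :
    PySem.Str.strip (PySem.Str.rstrip x) = PySem.Str.strip x := by
  rw [String.ext_iff]
  simp only [PySem.Str.strip, PySem.Str.rstrip, String.toList_ofList]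
  exact strip_rstrip x.toList

lemma str_strip_empty : PySem.Str.strip "" = "" := rfl

lemma pass2_getLast? (mid : List String) :
    (mid.foldl pass2Step []).getLast? = mid.getLast? := by
  induction mid using List.reverseRecOn with
  | nil => rfl
  | append_singleton mid x ih =>
    rw [List.foldl_append]
    simp [pass2Step]

lemma pass2_eq_nil_iff (mid : List String) :
    mid.foldl pass2Step [] = [] ↔ mid = [] := by
  rw [← List.getLast?_eq_none_iff, ← List.getLast?_eq_none_iff, pass2_getLast?]

set_option maxHeartbeats 1000000 in
lemma inv (ls : List String) :
    (ls.foldl stepA ([], false)).1 = (ls.foldl pass1Step []).foldl pass2Step []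
    ∧ (ls.foldl stepA ([], false)).2 = decide ((ls.foldl pass1Step []).getLast? = some "")
    ∧ (∀ m ∈ ls.foldl pass1Step [], (PySem.Str.strip m = "" ↔ m = "")) := by
  induction ls using List.reverseRecOn with
  | nil => exact ⟨rfl, rfl, by simp⟩
  | append_singleton ls x ih =>
    obtain ⟨h1, h2, h3⟩ := ih
    simp only [List.foldl_append, List.foldl_cons, List.foldl_nil]
    have hresLast : (List.foldl pass2Step [] (List.foldl pass1Step [] ls)).getLast?
        = (List.foldl pass1Step [] ls).getLast? := pass2_getLast? _
    have hresNil : List.foldl pass2Step [] (List.foldl pass1Step [] ls) = []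
        ↔ List.foldl pass1Step [] ls = [] := pass2_eq_nil_iff _
    generalize hM : List.foldl pass1Step [] ls = mid at h1 h2 h3 hresLast hresNil ⊢
    generalize hR : List.foldl pass2Step [] mid = res at h1 hresLast hresNil ⊢
    generalize hSdef : List.foldl stepA ([], false) ls = S at h1 h2 ⊢
    by_cases hep : PySem.Str.strip x = "" ∧ S.2 = true
    · -- both the A loop and pass 1 skip this line: states unchanged
      obtain ⟨he, hp⟩ := hep
      have hlast : mid.getLast? = some "" := by
        have := h2; rw [hp] at this; exact of_decide_eq_true this.symm
      have hmne : mid ≠ [] := by intro h; rw [h] at hlast; simp at hlast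
      have hsne : S.1 ≠ [] := by rw [h1, ne_eq, hresNil]; exact hmne
      have hs1last : S.1.getLast? = some "" := by rw [h1, hresLast]; exact hlast
      have hAskip : stepA S x = S := by
        have hcond : ((PySem.Str.strip x == "") && S.2 && !S.1.isEmpty
            && (PySem.Str.strip (S.1.getLast?.getD "") == "")) = true := by
          simp [he, hp, hs1last, hsne, str_strip_empty]
        simp [stepA, hcond]
      have hBskip : pass1Step mid x = mid := by
        have hr : PySem.Str.rstrip x = "" := (str_strip_nil_iff x).1 he
        have hcond : ((PySem.Str.rstrip x == "") && !mid.isEmpty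
            && (mid.getLast?.getD "" == "")) = true := by
          simp [hr, hlast, hmne]
        simp [pass1Step, hcond]
      rw [hAskip, hBskip, hR]
      exact ⟨h1, h2, h3⟩
    · -- the A loop takes its else branch; pass 1 appends
      have hB : pass1Step mid x = mid ++ [PySem.Str.rstrip x] := by
        have hguard : ((PySem.Str.rstrip x == "") && !mid.isEmpty
            && (mid.getLast?.getD "" == "")) = false := by
          by_cases hx : PySem.Str.rstrip x = ""
          · have he : PySem.Str.strip x = "" := (str_strip_nil_iff x).2 hx
            have hp : S.2 = false := by
              cases h : S.2
              · rfl
              · exact absurd ⟨he, h⟩ hep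
            have hlastne : mid.getLast? ≠ some "" := by
              rw [hp] at h2
              intro hc; rw [hc] at h2; simp at h2
            cases hgl : mid.getLast? with
            | none => simp [List.getLast?_eq_none_iff.1 hgl]
            | some m =>
              have hm : m ≠ "" := fun h => hlastne (by rw [hgl, h])
              simp [hm]
          · simp [hx]
        simp [pass1Step, hguard]
      -- the two header-guard conditions are equivalent
      have hlq : PySem.Str.strip (res.getLast?.getD "") = "" ↔ res.getLast?.getD "" = "" := by
        cases hgl : mid.getLast? with
        | none =>
          have : res.getLast? = none := by rw [hresLast, hgl]
          simp [this, str_strip_empty]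
        | some m =>
          have hrl : res.getLast? = some m := by rw [hresLast, hgl]
          have hmem : m ∈ mid := List.mem_of_getLast? hgl
          rw [hrl]
          exact h3 m hmem
      refine ⟨?_, ?_, ?_⟩
      · -- outputs agree
        rw [hB, List.foldl_append, List.foldl_cons, List.foldl_nil, hR]
        have hchs : PySem.Chars.strip (PySem.Chars.rstrip x.toList) = PySem.Chars.strip x.toList :=
          strip_rstrip x.toList
        simp only [stepA, pass2Step]
        simp [h1, hchs, hlq]
        split_ifs with h₁ h₂ h₃ h₄ h₅ h₆ h₇ h₈ <;> first | rfl | (exact absurd h₁.1.1 hep) | tauto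
      · -- the flag equals "last of pass-1 output is blank"
        rw [hB, List.getLast?_concat]
        have hA2 : (stepA S x).2 = (PySem.Str.strip x == "") := by
          have hef : ((PySem.Str.strip x == "") && S.2) = false := by
            by_cases he : PySem.Str.strip x = ""
            · have hp : S.2 = false := by
                cases h : S.2
                · rfl
                · exact absurd ⟨he, h⟩ hep
              simp [hp]
            · simp [he]
          have hcondA : ((PySem.Str.strip x == "") && S.2 && !S.1.isEmpty
              && (PySem.Str.strip (S.1.getLast?.getD "") == "")) = false := by
            simp [hef]
          simp [stepA, hcondA]
        rw [hA2, Bool.eq_iff_iff]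
        simp only [beq_iff_eq, decide_eq_true_eq, Option.some.injEq]
        exact str_strip_nil_iff x
      · -- every pass-1 entry is blank iff it is the empty string
        rw [hB]
        intro m hm
        rcases List.mem_append.1 hm with h | h
        · exact h3 m h
        · rw [List.mem_singleton.1 h, str_strip_rstrip]
          exact str_strip_nil_iff x

-- ===== VERDICT (by name: the statement is the Claim_ definition above) =====
theorem fix_blank_lines_spec : Claim_equal_fix_blank_lines := by
  intro content _
  unfold Spec_fix_blank_lines
  simp only [fix_blank_lines, fix_blank_lines_alt]
  exact congrArg _ (inv _).1
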